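-- pv_equiv track=rewrite | github.com/adnan-armouti/cs6120 | lesson_5/chk.py | rpo_order
-- ===== SOURCE A (Python) =====
-- def rpo_order(blocks, next_map):
--     """Reverse postorder numbering over the CFG."""
--     names = [b["name"] for b in blocks]
--     if not names: return {}, []
--     entry = names[0]
--     seen, post = set(), []
--     def dfs(u):
--         if u in seen: return
--         seen.add(u)
--         for v in next_map.get(u, []):
--             dfs(v)
--         post.append(u)
--     dfs(entry)
--     order = list(reversed(post))
--     num = {n: i for i, n in enumerate(order)}
--     return num, order
-- ===== SOURCE B (Python) =====
-- def rpo_order(blocks, next_map):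
--     """Reverse postorder numbering over the CFG (iterative DFS)."""
--     names = [b["name"] for b in blocks]
--     if not names: return {}, []
--     entry = names[0]
--     seen, post = set(), []
--     stack = [(entry, False)]
--     while stack:
--         u, processed = stack.pop()
--         if processed:
--             post.append(u)
--         elif u not in seen:
--             seen.add(u)
--             stack.append((u, True))
--             for v in reversed(next_map.get(u, [])):
--                 stack.append((v, False))
--     order = list(reversed(post))
--     num = {n: i for i, n in enumerate(order)}
--     return num, order
-- ===== Notes on version B (the rewrite author's own statement) =====
-- stated objective: alternative
-- what changed: The recursive dfs helper is replaced by an iterative explicit stack of (node, processed) frames (children pushed in reversed order, seen-check on pop), removing recursion while producing the identical reverse postorder.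
import Mathlib
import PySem

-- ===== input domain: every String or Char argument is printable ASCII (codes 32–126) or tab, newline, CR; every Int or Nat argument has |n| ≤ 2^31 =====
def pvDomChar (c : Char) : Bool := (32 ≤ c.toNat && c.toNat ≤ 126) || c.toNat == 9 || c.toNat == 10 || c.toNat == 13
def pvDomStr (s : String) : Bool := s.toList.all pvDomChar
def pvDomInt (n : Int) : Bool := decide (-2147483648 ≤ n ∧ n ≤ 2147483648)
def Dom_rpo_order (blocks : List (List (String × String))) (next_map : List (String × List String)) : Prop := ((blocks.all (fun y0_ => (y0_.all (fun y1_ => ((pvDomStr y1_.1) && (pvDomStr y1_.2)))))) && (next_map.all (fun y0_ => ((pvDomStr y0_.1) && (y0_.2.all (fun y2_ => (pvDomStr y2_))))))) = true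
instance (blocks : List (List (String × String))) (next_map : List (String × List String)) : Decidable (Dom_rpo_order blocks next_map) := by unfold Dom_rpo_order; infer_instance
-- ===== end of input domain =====

-- B replaces A's recursive dfs helper by an explicit stack of (node, processed) frames
-- (children pushed in reversed order, seen-check on pop); same reverse postorder, no recursion.

-- ===== PORT A =====

-- next_map.get(u, [])
def pvSuccs (next_map : List (String × List String)) (u : String) : List String :=
  (PySem.Dict.mk next_map).getD u []

-- universe of node names the DFS can ever touch (entry plus every key and successor of next_map);
-- its size bounds the recursion depth, giving the fuel for the fuel-encoded recursion below
def pvUniv (next_map : List (String × List String)) (entry : String) : List String :=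
  entry :: next_map.flatMap (fun p => p.1 :: p.2)

-- A's recursive dfs, fuel-encoded (none = out of fuel, which the sufficiency lemma below rules out);
-- pvDfsList is the 'for v in next_map.get(u, []): dfs(v)' loop
mutual
def pvDfs (next_map : List (String × List String)) :
    Nat → String → PySem.Set String → List String → Option (PySem.Set String × List String)
  | 0, _, _, _ => none
  | f+1, u, seen, post =>
    if seen.contains u then some (seen, post)
    else
      match pvDfsList next_map f (pvSuccs next_map u) (seen.add u) post with
      | none => none
      | some (seen', post') => some (seen', post' ++ [u])
  termination_by f _ _ _ => (f, 0)
def pvDfsList (next_map : List (String × List String)) :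
    Nat → List String → PySem.Set String → List String → Option (PySem.Set String × List String)
  | _, [], seen, post => some (seen, post)
  | f, v :: vs, seen, post =>
    match pvDfs next_map f v seen post with
    | none => none
    | some (seen', post') => pvDfsList next_map f vs seen' post'
  termination_by f vs _ _ => (f, vs.length + 1)
end

-- b["name"]: total stand-in for the dict lookup; Pre_ guarantees the key is present (KeyError otherwise)
def pvNames (blocks : List (List (String × String))) : List String :=
  blocks.map (fun b => (PySem.Dict.mk b).getD "name" "")

-- num = {n: i for i, n in enumerate(order)}; order = list(reversed(post))
def pvFinish (post : List String) : (List (String × Int)) × List String :=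
  let order := post.reverse
  (((PySem.List.enumerate order).foldl
      (fun d p => PySem.Dict.insert d p.2 p.1) (PySem.Dict.mk [])).items, order)

def rpo_order (blocks : List (List (String × String))) (next_map : List (String × List String)) : (List (String × Int)) × List String :=
  match pvNames blocks with
  | [] => ([], [])
  | entry :: _ =>
    match pvDfs next_map ((pvUniv next_map entry).length + 1) entry PySem.Set.empty [] with
    | none => ([], [])   -- unreachable: the fuel is sufficient (pvDfs_suff)
    | some (_, post) => pvFinish post

-- ===== PORT B =====

-- B's while loop over the explicit stack, fuel-encoded (none = out of fuel, ruled out by pvRun_suff);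
-- the foldl over reversed successors is the 'for v in reversed(next_map.get(u, [])): stack.append(...)' loop
def pvRun (next_map : List (String × List String)) :
    Nat → List (String × Bool) → PySem.Set String → List String → Option (PySem.Set String × List String)
  | _, [], seen, post => some (seen, post)
  | 0, _ :: _, _, _ => none
  | g+1, (u, processed) :: rest, seen, post =>
    if processed then pvRun next_map g rest seen (post ++ [u])
    else if seen.contains u then pvRun next_map g rest seen post
    else pvRun next_map g
      ((pvSuccs next_map u).reverse.foldl (fun st v => (v, false) :: st) ((u, true) :: rest))
      (seen.add u) post

-- fuel for the stack loop: each expansion pushes at most |all successor lists| + 1 frames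
def pvFuelB (next_map : List (String × List String)) (entry : String) : Nat :=
  (pvUniv next_map entry).length * ((next_map.flatMap Prod.snd).length + 2) + 1

def rpo_order_alt (blocks : List (List (String × String))) (next_map : List (String × List String)) : (List (String × Int)) × List String :=
  match pvNames blocks with
  | [] => ([], [])
  | entry :: _ =>
    match pvRun next_map (pvFuelB next_map entry) [(entry, false)] PySem.Set.empty [] with
    | none => ([], [])   -- unreachable: the fuel is sufficient (pvRun_suff)
    | some (_, post) => pvFinish post

-- ===== PRECONDITION & SPEC =====
-- Pre_ excludes exactly the inputs where A raises KeyError: a block without a "name" key.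
def Pre_rpo_order (blocks : List (List (String × String))) (next_map : List (String × List String)) : Prop :=
  (blocks.all (fun b => ((PySem.Dict.mk b).get? "name").isSome)) = true
instance (blocks : List (List (String × String))) (next_map : List (String × List String)) : Decidable (Pre_rpo_order blocks next_map) := by unfold Pre_rpo_order; infer_instance

def pvWitness_rpo_order : (List (List (String × String))) × (List (String × List String)) :=
  ([[("name", "a")], [("name", "b")]], [("a", ["b", "a"])])

def Spec_rpo_order (blocks : List (List (String × String))) (next_map : List (String × List String)) (out : (List (String × Int)) × List String) : Prop := out = rpo_order_alt blocks next_map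
instance (blocks : List (List (String × String))) (next_map : List (String × List String)) (out : (List (String × Int)) × List String) : Decidable (Spec_rpo_order blocks next_map out) := by unfold Spec_rpo_order; infer_instance

-- ===== CLAIM (what is proved, stated in full; the proofs are below) =====
def Claim_equal_rpo_order : Prop := ∀ (blocks : List (List (String × String))) (next_map : List (String × List String)), Dom_rpo_order blocks next_map → Pre_rpo_order blocks next_map → Spec_rpo_order blocks next_map (rpo_order blocks next_map)

-- ===== LEMMAS AND PROOFS =====

def pvUnseen (U : List String) (seen : PySem.Set String) : Nat :=
  (U.filter (fun x => !seen.contains x)).length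

lemma pvSuccs_cases (nm : List (String × List String)) (u : String) :
    pvSuccs nm u = [] ∨ ∃ p ∈ nm, pvSuccs nm u = p.2 := by
  induction nm with
  | nil => left; rfl
  | cons p rest ih =>
    unfold pvSuccs at *
    rw [PySem.Dict.getD_eq_get?_getD] at *
    obtain ⟨k, v⟩ := p
    rw [PySem.Dict.get?_mk_cons]
    by_cases hk : (k == u) = true
    · simp [hk]
    · simp only [hk]
      rcases ih with h | ⟨q, hq, hval⟩
      · left; exact h
      · right; exact ⟨q, List.mem_cons_of_mem _ hq, hval⟩

lemma pvSuccs_sub (nm : List (String × List String)) (entry u : String) :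
    ∀ v ∈ pvSuccs nm u, v ∈ pvUniv nm entry := by
  intro v hv
  rcases pvSuccs_cases nm u with h | ⟨p, hp, hval⟩
  · rw [h] at hv; cases hv
  · rw [hval] at hv
    right
    exact List.mem_flatMap.2 ⟨p, hp, List.mem_cons_of_mem _ hv⟩

lemma len_le_flatMap (nm : List (String × List String)) (p : String × List String) (hp : p ∈ nm) :
    p.2.length ≤ (nm.flatMap Prod.snd).length := by
  induction nm with
  | nil => cases hp
  | cons q rest ih =>
    rcases List.mem_cons.1 hp with rfl | hp
    · simp [List.flatMap_cons]
    · simp only [List.flatMap_cons, List.length_append]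
      exact le_add_of_nonneg_of_le (Nat.zero_le _) (ih hp) |>.trans (le_refl _)

lemma pvSuccs_len (nm : List (String × List String)) (u : String) :
    (pvSuccs nm u).length ≤ (nm.flatMap Prod.snd).length := by
  rcases pvSuccs_cases nm u with h | ⟨p, hp, hval⟩
  · simp [h]
  · rw [hval]; exact len_le_flatMap nm p hp

lemma pvUnseen_le_len (U : List String) (seen : PySem.Set String) : pvUnseen U seen ≤ U.length :=
  List.length_filter_le _ _

lemma pvUnseen_mono (U : List String) (seen seen' : PySem.Set String)
    (h : ∀ x, seen.contains x = true → seen'.contains x = true) :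
    pvUnseen U seen' ≤ pvUnseen U seen := by
  unfold pvUnseen
  rw [← List.countP_eq_length_filter, ← List.countP_eq_length_filter]
  refine List.countP_mono_left (fun x _ hx => ?_)
  cases hcx : seen.contains x
  · simp
  · rw [h x hcx] at hx
    simp at hx

lemma contains_add_of_contains (seen : PySem.Set String) (u x : String)
    (h : seen.contains x = true) : (seen.add u).contains x = true := by
  rw [PySem.Set.contains_iff] at *
  exact (PySem.Set.mem_add _ _ _).2 (Or.inl h)

lemma countP_lt {α : Type} (l : List α) (p q : α → Bool) (h : ∀ x ∈ l, p x = true → q x = true)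
    (u : α) (hu : u ∈ l) (hq : q u = true) (hp : p u = false) :
    l.countP p < l.countP q := by
  induction l with
  | nil => cases hu
  | cons x xs ih =>
    rcases List.mem_cons.1 hu with rfl | hu
    · rw [List.countP_cons, List.countP_cons, hp, hq]
      have := List.countP_mono_left (l := xs) (fun y hy => h y (List.mem_cons_of_mem _ hy))
      simp only [Bool.false_eq_true, if_false, if_true]
      omega
    · rw [List.countP_cons, List.countP_cons]
      have := ih (fun y hy => h y (List.mem_cons_of_mem _ hy)) hu
      have hxq : (if p x = true then 1 else 0) ≤ (if q x = true then 1 else 0) := by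
        by_cases hx : p x = true
        · simp [hx, h x (List.mem_cons_self) hx]
        · have hpx : p x = false := by cases hpx' : p x <;> simp_all
          rw [hpx]
          simp
      exact Nat.add_lt_add_of_lt_of_le this hxq

lemma pvUnseen_add_lt (U : List String) (seen : PySem.Set String) (u : String)
    (hu : u ∈ U) (hn : seen.contains u = false) :
    pvUnseen U (seen.add u) < pvUnseen U seen := by
  unfold pvUnseen
  rw [← List.countP_eq_length_filter, ← List.countP_eq_length_filter]
  refine countP_lt U _ _ ?_ u hu (by simp only [Bool.not_eq_true']; exact hn) ?_
  · intro x _ hx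
    cases hcx : seen.contains x
    · simp
    · rw [contains_add_of_contains seen u x hcx] at hx
      simp at hx
  · have h1 : (seen.add u).contains u = true := by
      rw [PySem.Set.contains_iff]
      exact (PySem.Set.mem_add _ _ _).2 (Or.inr rfl)
    simp only [h1, Bool.not_true]

-- the dfs only grows 'seen'
lemma pvDfs_grows (nm : List (String × List String)) :
    ∀ f, (∀ u seen post seen' post', pvDfs nm f u seen post = some (seen', post') →
      ∀ x, seen.contains x = true → seen'.contains x = true) ∧
    (∀ vs seen post seen' post', pvDfsList nm f vs seen post = some (seen', post') →
      ∀ x, seen.contains x = true → seen'.contains x = true) := by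
  intro f
  induction f with
  | zero =>
    constructor
    · intro u seen post seen' post' h
      simp [pvDfs] at h
    · intro vs seen post seen' post' h x hx
      cases vs with
      | nil =>
        simp only [pvDfsList, Option.some.injEq, Prod.mk.injEq] at h
        rw [← h.1]; exact hx
      | cons v vs => simp [pvDfsList, pvDfs] at h
  | succ f ih =>
    have hnode : ∀ u seen post seen' post', pvDfs nm (f+1) u seen post = some (seen', post') →
        ∀ x, seen.contains x = true → seen'.contains x = true := by
      intro u seen post seen' post' h x hx
      rw [pvDfs] at h
      by_cases hc : seen.contains u = true
      · rw [if_pos hc] at h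
        cases h
        exact hx
      · rw [if_neg hc] at h
        cases hl : pvDfsList nm f (pvSuccs nm u) (seen.add u) post with
        | none => rw [hl] at h; cases h
        | some pr =>
          obtain ⟨s1, p1⟩ := pr
          rw [hl] at h
          cases h
          exact ih.2 _ _ _ _ _ hl x (contains_add_of_contains _ _ _ hx)
    refine ⟨hnode, ?_⟩
    intro vs
    induction vs with
    | nil =>
      intro seen post seen' post' h x hx
      simp only [pvDfsList, Option.some.injEq, Prod.mk.injEq] at h
      rw [← h.1]; exact hx
    | cons v vs ihvs =>
      intro seen post seen' post' h x hx
      rw [pvDfsList] at h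
      cases hd : pvDfs nm (f+1) v seen post with
      | none => rw [hd] at h; cases h
      | some pr =>
        obtain ⟨s1, p1⟩ := pr
        rw [hd] at h
        exact ihvs _ _ _ _ h x (hnode _ _ _ _ _ hd x hx)

-- fuel sufficiency for A's dfs
lemma pvDfs_suff (nm : List (String × List String)) (entry : String) :
    ∀ f, (∀ u seen post, u ∈ pvUniv nm entry → pvUnseen (pvUniv nm entry) seen < f →
      (pvDfs nm f u seen post).isSome) ∧
    (∀ vs seen post, (∀ v ∈ vs, v ∈ pvUniv nm entry) → pvUnseen (pvUniv nm entry) seen < f →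
      (pvDfsList nm f vs seen post).isSome) := by
  intro f
  induction f with
  | zero =>
    constructor
    · intro u seen post _ hlt
      omega
    · intro vs seen post hvs hlt
      omega
  | succ f ih =>
    have hnode : ∀ u seen post, u ∈ pvUniv nm entry →
        pvUnseen (pvUniv nm entry) seen < f + 1 → (pvDfs nm (f+1) u seen post).isSome := by
      intro u seen post hu hlt
      rw [pvDfs]
      by_cases hc : seen.contains u = true
      · rw [if_pos hc]
        rfl
      · rw [if_neg hc]
        have hlt' : pvUnseen (pvUniv nm entry) (seen.add u) < f := by
          have := pvUnseen_add_lt (pvUniv nm entry) seen u hu (by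
            cases hcu : seen.contains u
            · rfl
            · exact absurd hcu hc)
          omega
        have := ih.2 (pvSuccs nm u) (seen.add u) post (fun v hv => pvSuccs_sub nm entry u v hv) hlt'
        cases hl : pvDfsList nm f (pvSuccs nm u) (seen.add u) post with
        | none => rw [hl] at this; cases this
        | some pr => obtain ⟨s1, p1⟩ := pr; rfl
    refine ⟨fun u seen post hu hlt => hnode u seen post hu (by omega), ?_⟩
    intro vs
    induction vs with
    | nil => intro seen post _ _; rw [pvDfsList]; rfl
    | cons v vs ihvs =>
      intro seen post hvs hlt
      rw [pvDfsList]
      have h1 := hnode v seen post (hvs v List.mem_cons_self) hlt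
      cases hd : pvDfs nm (f+1) v seen post with
      | none => rw [hd] at h1; cases h1
      | some pr =>
        obtain ⟨s1, p1⟩ := pr
        have hgrow := (pvDfs_grows nm (f+1)).1 _ _ _ _ _ hd
        have hle := pvUnseen_mono (pvUniv nm entry) seen s1 hgrow
        exact ihvs s1 p1 (fun y hy => hvs y (List.mem_cons_of_mem _ hy)) (by omega)

-- the stack loop is fuel-monotone
lemma pvRun_mono (nm : List (String × List String)) :
    ∀ g stk seen post r, pvRun nm g stk seen post = some r → pvRun nm (g+1) stk seen post = some r := by
  intro g
  induction g with
  | zero =>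
    intro stk seen post r h
    cases stk with
    | nil => exact h
    | cons p rest => simp [pvRun] at h
  | succ g ih =>
    intro stk seen post r h
    cases stk with
    | nil => exact h
    | cons p rest =>
      obtain ⟨u, processed⟩ := p
      rw [pvRun] at h ⊢
      by_cases hp : processed = true
      · rw [if_pos hp] at h ⊢
        exact ih _ _ _ _ h
      · rw [if_neg hp] at h ⊢
        by_cases hc : seen.contains u = true
        · rw [if_pos hc] at h ⊢
          exact ih _ _ _ _ h
        · rw [if_neg hc] at h ⊢
          exact ih _ _ _ _ h

lemma pvRun_mono_le (nm : List (String × List String)) (g g' : Nat) (h : g ≤ g') :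
    ∀ stk seen post r, pvRun nm g stk seen post = some r → pvRun nm g' stk seen post = some r := by
  induction g' with
  | zero =>
    intro stk seen post r hr
    rw [Nat.le_zero.1 h] at hr
    exact hr
  | succ g' ih =>
    intro stk seen post r hr
    rcases Nat.lt_or_ge g (g' + 1) with hlt | hge
    · exact pvRun_mono nm g' _ _ _ _ (ih (by omega) _ _ _ _ hr)
    · have : g = g' + 1 := by omega
      rw [this] at hr
      exact hr

lemma pvRun_det (nm : List (String × List String)) (g g' : Nat) (stk : List (String × Bool))
    (seen : PySem.Set String) (post : List String) (r r' : PySem.Set String × List String)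
    (h : pvRun nm g stk seen post = some r) (h' : pvRun nm g' stk seen post = some r') : r = r' := by
  have h1 := pvRun_mono_le nm g (max g g') (le_max_left _ _) _ _ _ _ h
  have h2 := pvRun_mono_le nm g' (max g g') (le_max_right _ _) _ _ _ _ h'
  rw [h1] at h2
  exact Option.some.inj h2

-- pushing reversed successors one by one = prepending them in order
lemma pvPush_rev (vs : List String) (acc : List (String × Bool)) :
    vs.reverse.foldl (fun st v => (v, false) :: st) acc = vs.map (fun v => (v, false)) ++ acc := by
  induction vs generalizing acc with
  | nil => rfl
  | cons v vs ih =>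
    rw [List.reverse_cons, List.foldl_append]
    simp only [List.foldl_cons, List.foldl_nil, List.map_cons, List.cons_append]
    rw [ih]

-- simulation: a completed dfs call corresponds to processing one unprocessed frame
lemma pvSim (nm : List (String × List String)) :
    ∀ f, (∀ u seen post seen' post', pvDfs nm f u seen post = some (seen', post') →
      ∀ rest g r, pvRun nm g rest seen' post' = some r →
        ∃ h, pvRun nm h ((u, false) :: rest) seen post = some r) := by
  intro f
  induction f with
  | zero =>
    intro u seen post seen' post' hd
    simp [pvDfs] at hd
  | succ f ih =>
    have hlist : ∀ vs seen post seen' post', pvDfsList nm f vs seen post = some (seen', post') →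
        ∀ rest g r, pvRun nm g rest seen' post' = some r →
        ∃ h, pvRun nm h (vs.map (fun v => (v, false)) ++ rest) seen post = some r := by
      intro vs
      induction vs with
      | nil =>
        intro seen post seen' post' hd rest g r hr
        rw [pvDfsList] at hd
        cases hd
        exact ⟨g, by simpa using hr⟩
      | cons v vs ihvs =>
        intro seen post seen' post' hd rest g r hr
        rw [pvDfsList] at hd
        cases hv : pvDfs nm f v seen post with
        | none => rw [hv] at hd; cases hd
        | some pr =>
          obtain ⟨s1, p1⟩ := pr
          rw [hv] at hd
          obtain ⟨h1, hrun1⟩ := ihvs _ _ _ _ hd rest g r hr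
          obtain ⟨h2, hrun2⟩ := ih _ _ _ _ _ hv (vs.map (fun v => (v, false)) ++ rest) h1 r hrun1
          exact ⟨h2, by simpa using hrun2⟩
    intro u seen post seen' post' hd rest g r hr
    rw [pvDfs] at hd
    by_cases hc : seen.contains u = true
    · rw [if_pos hc] at hd
      cases hd
      refine ⟨g + 1, ?_⟩
      rw [pvRun]
      simp only [Bool.false_eq_true, if_false]
      rw [if_pos hc]
      exact hr
    · rw [if_neg hc] at hd
      cases hl : pvDfsList nm f (pvSuccs nm u) (seen.add u) post with
      | none => rw [hl] at hd; cases hd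
      | some pr =>
        obtain ⟨s1, p1⟩ := pr
        rw [hl] at hd
        rw [Option.some.injEq, Prod.mk.injEq] at hd
        obtain ⟨hd1, hd2⟩ := hd
        subst hd1
        subst hd2
        have hr1 : pvRun nm (g + 1) ((u, true) :: rest) s1 p1 = some r := by
          rw [pvRun]
          rw [if_pos rfl]
          exact hr
        obtain ⟨h1, hrun1⟩ := hlist _ _ _ _ _ hl ((u, true) :: rest) (g + 1) r hr1
        refine ⟨h1 + 1, ?_⟩
        rw [pvRun]
        simp only [Bool.false_eq_true, if_false]
        rw [if_neg hc, pvPush_rev]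
        exact hrun1

-- fuel sufficiency for B's stack loop
lemma pvRun_suff (nm : List (String × List String)) (entry : String) :
    ∀ g stk seen post, (∀ p ∈ stk, p.1 ∈ pvUniv nm entry) →
      stk.length + pvUnseen (pvUniv nm entry) seen * ((nm.flatMap Prod.snd).length + 2) ≤ g →
      (pvRun nm g stk seen post).isSome := by
  intro g
  induction g with
  | zero =>
    intro stk seen post hU hlen
    cases stk with
    | nil => rw [pvRun]; rfl
    | cons p rest => simp [List.length_cons] at hlen
  | succ g ih =>
    intro stk seen post hU hlen
    cases stk with
    | nil => rw [pvRun]; rfl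
    | cons p rest =>
      obtain ⟨u, processed⟩ := p
      rw [pvRun]
      by_cases hp : processed = true
      · rw [if_pos hp]
        refine ih rest seen (post ++ [u]) (fun q hq => hU q (List.mem_cons_of_mem _ hq)) ?_
        simp only [List.length_cons] at hlen
        omega
      · rw [if_neg hp]
        by_cases hc : seen.contains u = true
        · rw [if_pos hc]
          refine ih rest seen post (fun q hq => hU q (List.mem_cons_of_mem _ hq)) ?_
          simp only [List.length_cons] at hlen
          omega
        · rw [if_neg hc]
          rw [pvPush_rev]
          have huU : u ∈ pvUniv nm entry := hU (u, processed) List.mem_cons_self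
          refine ih _ _ _ ?_ ?_
          · intro q hq
            rcases List.mem_append.1 hq with hq | hq
            · obtain ⟨v, hv, rfl⟩ := List.mem_map.1 hq
              exact pvSuccs_sub nm entry u v hv
            · rcases List.mem_cons.1 hq with rfl | hq
              · exact huU
              · exact hU q (List.mem_cons_of_mem _ hq)
          · have hlt := pvUnseen_add_lt (pvUniv nm entry) seen u huU (by
              cases hcu : seen.contains u
              · rfl
              · exact absurd hcu hc)
            have hkey : pvUnseen (pvUniv nm entry) (seen.add u) * ((nm.flatMap Prod.snd).length + 2)
                + ((nm.flatMap Prod.snd).length + 2)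
                ≤ pvUnseen (pvUniv nm entry) seen * ((nm.flatMap Prod.snd).length + 2) := by
              rw [← Nat.succ_mul]
              exact Nat.mul_le_mul_right _ hlt
            have hsl := pvSuccs_len nm u
            simp only [List.length_append, List.length_map, List.length_cons] at hlen ⊢
            linarith

-- ===== VERDICT (by name: the statement is the Claim_ definition above) =====
theorem rpo_order_spec : Claim_equal_rpo_order := by
  intro blocks next_map hdom hpre
  unfold Spec_rpo_order rpo_order rpo_order_alt
  cases hn : pvNames blocks with
  | nil => rfl
  | cons entry tl =>
    have hunseen := pvUnseen_le_len (pvUniv next_map entry) PySem.Set.empty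
    have hA := (pvDfs_suff next_map entry ((pvUniv next_map entry).length + 1)).1 entry
      PySem.Set.empty [] List.mem_cons_self (by omega)
    cases hda : pvDfs next_map ((pvUniv next_map entry).length + 1) entry PySem.Set.empty [] with
    | none => rw [hda] at hA; cases hA
    | some prA =>
      obtain ⟨sA, postA⟩ := prA
      have hB := pvRun_suff next_map entry (pvFuelB next_map entry) [(entry, false)]
        PySem.Set.empty []
        (by
          intro p hp
          rcases List.mem_cons.1 hp with rfl | hp
          · exact List.mem_cons_self
          · cases hp)
        (by
          unfold pvFuelB
          have := Nat.mul_le_mul_right ((next_map.flatMap Prod.snd).length + 2) hunseen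
          simp only [List.length_cons, List.length_nil]
          omega)
      cases hrb : pvRun next_map (pvFuelB next_map entry) [(entry, false)] PySem.Set.empty [] with
      | none => rw [hrb] at hB; cases hB
      | some prB =>
        obtain ⟨sB, postB⟩ := prB
        obtain ⟨h, hrun⟩ := pvSim next_map ((pvUniv next_map entry).length + 1) entry
          PySem.Set.empty [] sA postA hda [] 0 (sA, postA) (by rw [pvRun])
        have hdet := pvRun_det next_map h (pvFuelB next_map entry) [(entry, false)]
          PySem.Set.empty [] (sA, postA) (sB, postB) hrun hrb
        rw [Prod.mk.injEq] at hdet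
        dsimp only
        rw [hda, hrb]
        dsimp only
        rw [hdet.2]
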